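-- pv_equiv track=rewrite | github.com/JasonTube/Solutions_to_PAT | 1003.py | pat
-- ===== SOURCE A (Python) =====
-- def pat(string):
--     string = list(string)
--     p_index = -1
--     t_index = -1
--
--     for index,value in enumerate(string):
--         if value == 'P' and p_index == -1:
--             p_index = index
--             continue
--         elif value == 'T' and t_index == -1:
--             t_index = index
--             continue
--         elif value == 'A':
--             continue
--         else:
--             return "NO"
--
--     a = p_index
--     b = t_index - p_index - 1
--     c = len(string) - t_index -1
--
--     if b == 1:
--         return "YES"
--     elif b == 0:
--         return "NO"
--     elif c == a*b:
--         return "YES"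
--     else:
--         return "NO"
-- ===== SOURCE B (Python) =====
-- def pat(string):
--     s = list(string)
--     if any(ch not in ('P', 'A', 'T') for ch in s) or s.count('P') > 1 or s.count('T') > 1:
--         return "NO"
--     p = s.index('P') if 'P' in s else -1
--     t = s.index('T') if 'T' in s else -1
--     b = t - p - 1
--     if b == 1:
--         return "YES"
--     if b == 0:
--         return "NO"
--     return "YES" if len(s) - t - 1 == p * b else "NO"
-- ===== Notes on version B (the rewrite author's own statement) =====
-- stated objective: simpler
-- what changed: A's single fused stateful loop (mutable first-seen indices with early return) is replaced by independent whole-string checks: a character-validity scan plus count-based multiplicity checks decide rejection up front, then index-with-fallback and the same closing arithmetic.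
import Mathlib
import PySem

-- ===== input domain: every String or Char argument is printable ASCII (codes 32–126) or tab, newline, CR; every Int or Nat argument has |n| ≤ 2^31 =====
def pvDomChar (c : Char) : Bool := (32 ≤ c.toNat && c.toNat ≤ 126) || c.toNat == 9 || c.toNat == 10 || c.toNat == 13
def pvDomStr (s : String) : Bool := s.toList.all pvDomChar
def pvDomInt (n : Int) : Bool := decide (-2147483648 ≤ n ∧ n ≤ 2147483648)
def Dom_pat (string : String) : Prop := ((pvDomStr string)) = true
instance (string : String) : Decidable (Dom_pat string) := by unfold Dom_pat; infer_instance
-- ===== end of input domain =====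

-- B replaces A's fused stateful validation loop (mutable first-seen indices, early return) by
-- independent whole-string checks (validity scan, counts, index-with-fallback) plus the same
-- closing arithmetic; objective: simpler.

-- ===== PORT A =====
-- A's for-loop: state = (p_index, t_index) and the running index; none = the early 'return "NO"'
def patLoop : List Char → Int → Int → Int → Option (Int × Int)
  | [], p, t, _ => some (p, t)
  | v :: rest, p, t, i =>
    if v = 'P' ∧ p = -1 then patLoop rest i t (i + 1)
    else if v = 'T' ∧ t = -1 then patLoop rest p i (i + 1)
    else if v = 'A' then patLoop rest p t (i + 1)
    else none

def pat (string : String) : String :=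
  match patLoop string.toList (-1) (-1) 0 with
  | none => "NO"
  | some (p, t) =>
    let a := p
    let b := t - p - 1
    let c := (string.toList.length : Int) - t - 1
    if b = 1 then "YES"
    else if b = 0 then "NO"
    else if c = a * b then "YES"
    else "NO"

-- ===== PORT B =====
def pat_alt (string : String) : String :=
  let s := string.toList
  if (s.any fun ch => ¬(ch = 'P' ∨ ch = 'A' ∨ ch = 'T'))
      ∨ 1 < PySem.List.count s 'P' ∨ 1 < PySem.List.count s 'T' then "NO"
  else
    let p : Int := match PySem.List.index? s 'P' with | some n => (n : Int) | none => -1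
    let t : Int := match PySem.List.index? s 'T' with | some n => (n : Int) | none => -1
    let b := t - p - 1
    if b = 1 then "YES"
    else if b = 0 then "NO"
    else if (s.length : Int) - t - 1 = p * b then "YES"
    else "NO"

-- ===== PRECONDITION & SPEC =====
def Spec_pat (string : String) (out : String) : Prop := out = pat_alt string
instance (string : String) (out : String) : Decidable (Spec_pat string out) := by unfold Spec_pat; infer_instance

-- ===== CLAIM (what is proved, stated in full; the proofs are below) =====
def Claim_equal_pat : Prop := ∀ (string : String), Dom_pat string → Spec_pat string (pat string)

-- ===== LEMMAS AND PROOFS =====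

-- first index of c in l, counting from offset i; -1 if absent
def fidx (c : Char) : List Char → Int → Int
  | [], _ => -1
  | x :: xs, i => if x = c then i else fidx c xs (i + 1)

lemma fidx_eq_index? (c : Char) (l : List Char) (i : Int) :
    fidx c l i = match PySem.List.index? l c with
                 | some n => i + (n : Int)
                 | none => -1 := by
  induction l generalizing i with
  | nil => simp [fidx, PySem.List.index?]
  | cons x xs ih =>
    by_cases hx : x = c
    · subst hx
      rw [PySem.List.index?_cons_self]
      simp [fidx]
    · rw [PySem.List.index?_cons_of_ne _ hx]
      simp only [fidx, if_neg hx, ih]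
      cases PySem.List.index? xs c
      · simp
      · simp; ring

lemma patLoop_eq (l : List Char) (p t i : Int) (hi : 0 ≤ i) :
    patLoop l p t i =
      if (l.all fun v => v = 'P' ∨ v = 'A' ∨ v = 'T')
          ∧ l.count 'P' + (if p = -1 then 0 else 1) ≤ 1
          ∧ l.count 'T' + (if t = -1 then 0 else 1) ≤ 1
      then some ((if p = -1 then fidx 'P' l i else p), (if t = -1 then fidx 'T' l i else t))
      else none := by
  induction l generalizing p t i with
  | nil =>
    rw [patLoop, if_pos]
    · simp only [fidx]
      split_ifs <;> simp_all
    · refine ⟨by simp, ?_, ?_⟩ <;> split_ifs <;> simp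
  | cons v rest ih =>
    have hi1 : (0:Int) ≤ i + 1 := by omega
    have hine : i ≠ -1 := by omega
    by_cases hP : v = 'P' ∧ p = -1
    · obtain ⟨hv, hp⟩ := hP
      subst hv; subst hp
      rw [patLoop, if_pos ⟨rfl, rfl⟩, ih _ _ _ hi1]
      simp [List.all_cons, fidx, hine]
    · by_cases hT : v = 'T' ∧ t = -1
      · obtain ⟨hv, ht⟩ := hT
        subst hv; subst ht
        rw [patLoop, if_neg hP, if_pos ⟨rfl, rfl⟩, ih _ _ _ hi1]
        simp [List.all_cons, fidx, hine]
      · by_cases hA : v = 'A'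
        · subst hA
          rw [patLoop, if_neg hP, if_neg hT, if_pos rfl, ih _ _ _ hi1]
          simp [List.all_cons, fidx]
        · rw [patLoop, if_neg hP, if_neg hT, if_neg hA, if_neg]
          rintro ⟨hall, hcp, hct⟩
          simp only [List.all_cons, Bool.and_eq_true, decide_eq_true_eq] at hall
          rcases hall.1 with h | h | h
          · subst h
            have hp : p ≠ -1 := fun hp => hP ⟨rfl, hp⟩
            rw [List.count_cons_self, if_neg hp] at hcp; omega
          · exact hA h
          · subst h
            have ht : t ≠ -1 := fun ht => hT ⟨rfl, ht⟩
            rw [List.count_cons_self, if_neg ht] at hct; omega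

-- ===== VERDICT (by name: the statement is the Claim_ definition above) =====
theorem pat_spec : Claim_equal_pat := by
  intro string _
  unfold Spec_pat
  simp only [pat, pat_alt, PySem.List.count_eq]
  rw [patLoop_eq _ _ _ _ le_rfl,
      fidx_eq_index? 'P' string.toList 0, fidx_eq_index? 'T' string.toList 0]
  by_cases hA : ((string.toList.all fun v => v = 'P' ∨ v = 'A' ∨ v = 'T')) = true
      ∧ (List.count 'P' string.toList + if (-1:Int) = -1 then 0 else 1) ≤ 1
      ∧ (List.count 'T' string.toList + if (-1:Int) = -1 then 0 else 1) ≤ 1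
  · rw [if_pos hA]
    obtain ⟨h1, h2, h3⟩ := hA
    norm_num at h2 h3
    rw [if_neg (?_ : ¬((string.toList.any fun ch => ¬(ch = 'P' ∨ ch = 'A' ∨ ch = 'T')) = true
        ∨ 1 < List.count 'P' string.toList ∨ 1 < List.count 'T' string.toList))]
    · simp
    · refine not_or.mpr ⟨?_, not_or.mpr ⟨by omega, by omega⟩⟩
      intro hany
      rw [List.all_eq_true] at h1
      obtain ⟨x, hx, hbad⟩ := List.any_eq_true.mp hany
      exact (of_decide_eq_true hbad) (of_decide_eq_true (h1 x hx))
  · rw [if_neg hA]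
    rw [if_pos (?_ : ((string.toList.any fun ch => ¬(ch = 'P' ∨ ch = 'A' ∨ ch = 'T')) = true
        ∨ 1 < List.count 'P' string.toList ∨ 1 < List.count 'T' string.toList))]
    by_contra hB
    rw [not_or, not_or] at hB
    obtain ⟨hb1, hb2, hb3⟩ := hB
    refine hA ⟨?_, by norm_num; omega, by norm_num; omega⟩
    rw [List.all_eq_true]
    intro x hx
    apply decide_eq_true
    by_contra hxx
    exact hb1 (List.any_eq_true.mpr ⟨x, hx, decide_eq_true hxx⟩)
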